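-- pv_equiv track=rewrite | github.com/bigkangaroo123/code_python | moseymakes.py | c_checker
-- ===== SOURCE A (Python) =====
-- def c_checker(c, word):
--     cons = "bcdfghjklmnpqrstvwxyz"
--     counter = 0
--     for char in word:
--         if char in cons:
--             counter += 1
--         else:
--             counter = 0
--
--         if counter > c:
--             return False
--
--     return True
-- ===== SOURCE B (Python) =====
-- def c_checker(c, word):
--     cons = "bcdfghjklmnpqrstvwxyz"
--     i, n = 0, len(word)
--     while i < n:
--         j = i
--         while j < n and word[j] in cons:
--             j += 1
--         if j - i > c:
--             return False
--         i = j + 1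
--     return True
-- ===== Notes on version B (the rewrite author's own statement) =====
-- stated objective: alternative
-- what changed: Replaces A's per-character counter with reset by an outer loop that measures each maximal consonant run with an inner scan and jumps past it, checking the whole run length at once.
import Mathlib
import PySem

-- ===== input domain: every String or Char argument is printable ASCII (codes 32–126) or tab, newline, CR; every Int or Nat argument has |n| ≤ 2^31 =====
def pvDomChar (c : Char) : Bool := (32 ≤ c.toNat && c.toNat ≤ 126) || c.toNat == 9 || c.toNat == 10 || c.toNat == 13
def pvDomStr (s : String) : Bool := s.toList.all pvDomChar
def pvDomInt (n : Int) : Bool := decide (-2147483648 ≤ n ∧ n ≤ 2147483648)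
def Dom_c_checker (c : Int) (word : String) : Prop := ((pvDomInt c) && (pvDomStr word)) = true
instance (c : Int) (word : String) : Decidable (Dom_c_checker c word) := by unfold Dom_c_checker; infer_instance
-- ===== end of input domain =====

-- B replaces A's per-character reset counter by an outer loop over maximal consonant runs
-- (inner scan measures each run, then jumps past it); return value proved equal on all inputs.
-- ===== PORT A =====
-- the constant `cons = "bcdfghjklmnpqrstvwxyz"`; `char in cons`
def pvIsCons (ch : Char) : Bool := "bcdfghjklmnpqrstvwxyz".toList.contains ch

-- the for-loop of A: state = counter, early `return False` = stopping with false
def cGoA (c : Int) (counter : Int) : List Char → Bool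
  | [] => true
  | ch :: t =>
    let counter' := if pvIsCons ch then counter + 1 else 0
    if counter' > c then false else cGoA c counter' t

def c_checker (c : Int) (word : String) : Bool := cGoA c 0 word.toList

-- ===== PORT B =====
-- inner while loop of B: length of the maximal leading consonant run
def runLenB : List Char → Nat
  | [] => 0
  | ch :: t => if pvIsCons ch then runLenB t + 1 else 0

theorem runLenB_le_length (l : List Char) : runLenB l ≤ l.length := by
  induction l with
  | nil => simp [runLenB]
  | cons ch t ih => simp only [runLenB, List.length_cons]; split <;> omega

-- outer while loop of B: check the run at the front, then jump past it (i = j + 1)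
def cGoB (c : Int) (l : List Char) : Bool :=
  if h : l = [] then true
  else
    let j := runLenB l
    if (j : Int) > c then false else cGoB c (l.drop (j + 1))
termination_by l.length
decreasing_by
  have := runLenB_le_length l
  have : 0 < l.length := List.length_pos_iff.mpr h
  simp [List.length_drop]; omega

def c_checker_alt (c : Int) (word : String) : Bool := cGoB c word.toList

-- ===== PRECONDITION & SPEC =====
def Spec_c_checker (c : Int) (word : String) (out : Bool) : Prop := out = c_checker_alt c word
instance (c : Int) (word : String) (out : Bool) : Decidable (Spec_c_checker c word out) := by unfold Spec_c_checker; infer_instance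

-- ===== CLAIM (what is proved, stated in full; the proofs are below) =====
def Claim_equal_c_checker : Prop := ∀ (c : Int) (word : String), Dom_c_checker c word → Spec_c_checker c word (c_checker c word)

-- ===== LEMMAS AND PROOFS =====

-- unfold one step of cGoB, valid also for [] when 0 ≤ c
theorem cGoB_step (c : Int) (hc : 0 ≤ c) (l : List Char) :
    cGoB c l = if ((runLenB l : Int) > c) then false else cGoB c (l.drop (runLenB l + 1)) := by
  by_cases h : l = []
  · subst h; simp [cGoB, runLenB]; omega
  · rw [cGoB]; simp [h]

-- main invariant: A's loop with a running counter ≤ c equals B's run-at-a-time check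
theorem goA_eq (c : Int) (l : List Char) : ∀ counter : Int, 0 ≤ counter → counter ≤ c →
    cGoA c counter l =
      if (counter + (runLenB l : Int) > c) then false else cGoB c (l.drop (runLenB l + 1)) := by
  induction l with
  | nil =>
    intro counter h0 hc
    simp only [cGoA, runLenB, List.drop_nil]
    rw [if_neg (by omega), cGoB]
    simp
  | cons ch t ih =>
    intro counter h0 hc
    by_cases hcons : pvIsCons ch
    · simp only [cGoA, runLenB, hcons, if_true]
      by_cases hgt : counter + 1 > c
      · rw [if_pos hgt, if_pos (by push_cast; omega)]
      · rw [if_neg hgt, ih (counter + 1) (by omega) (by omega)]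
        have hdrop : (ch :: t).drop ((runLenB t + 1) + 1) = t.drop (runLenB t + 1) := by
          simp [List.drop]
        rw [hdrop]
        congr 1
        simp only [eq_iff_iff]
        push_cast
        constructor <;> intro <;> omega
    · have hc2 : pvIsCons ch = false := by simpa using hcons
      simp only [cGoA, runLenB, hc2, Bool.false_eq_true, if_false, Nat.cast_zero, add_zero]
      rw [if_neg (by omega : ¬ (0 : Int) > c), ih 0 le_rfl (by omega)]
      rw [if_neg (by omega : ¬ counter > c)]
      simp only [List.drop_succ_cons, List.drop_zero, zero_add]
      exact (cGoB_step c (by omega) t).symm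

theorem ports_agree (c : Int) (word : String) : c_checker c word = c_checker_alt c word := by
  unfold c_checker c_checker_alt
  set l := word.toList with hl
  by_cases hc : 0 ≤ c
  · rw [goA_eq c l 0 le_rfl hc, Int.zero_add, (cGoB_step c hc l).symm]
  · cases l with
    | nil => simp [cGoA, cGoB]
    | cons ch t =>
      have hA : cGoA c 0 (ch :: t) = false := by
        by_cases hpc : pvIsCons ch = true <;>
          simp only [cGoA, hpc, Bool.false_eq_true, if_true, if_false, zero_add] <;>
          rw [if_pos (by omega)]
      have hB : cGoB c (ch :: t) = false := by
        rw [cGoB, dif_neg (by simp : ¬ (ch :: t) = [])]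
        rw [if_pos (by have := Int.natCast_nonneg (runLenB (ch :: t)); omega)]
      rw [hA, hB]

-- ===== VERDICT =====
theorem c_checker_spec : Claim_equal_c_checker := by
  intro c word _
  unfold Spec_c_checker
  exact ports_agree c word
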